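-- pv_equiv track=rewrite | github.com/Tiamiscool/BrutePy | passwordgen.py | get_number_letter_combinations
-- ===== SOURCE A (Python) =====
-- import itertools
--
-- alphabet = 'abcdefghijklmnopqrstuvwxyz'
--
-- def get_number_letter_combinations(max_length):
--     output = []
--     for number in range(max_length, 0, -1):
--         output.append(str(number))
--         for length in range(1, max_length + 1):
--             for combination in itertools.product(alphabet, repeat=length):
--                 output.append(str(number) + ''.join(combination))
--     return '\n'.join(output) + '\n'
-- ===== SOURCE B (Python) =====
-- def get_number_letter_combinations(max_length):
--     # Grow the suffix table by dynamic programming: each level extends the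
--     # previous one by one trailing letter (itertools.product order preserved,
--     # since the last position varies fastest).  The empty suffix stands for
--     # the bare-number line, so one flat double comprehension emits everything.
--     suffixes = ['']
--     level = ['']
--     for _ in range(max_length):
--         level = [s + c for s in level for c in 'abcdefghijklmnopqrstuvwxyz']
--         suffixes += level
--     return '\n'.join(str(n) + s
--                      for n in range(max_length, 0, -1)
--                      for s in suffixes) + '\n'
-- ===== Notes on version B (the rewrite author's own statement) =====
-- stated objective: alternative
-- what changed: B builds the suffix table by dynamic programming (each level extends the previous level by one trailing letter) instead of calling itertools.product per length inside every number's loop, and treats the empty suffix as the bare-number line so one flat comprehension emits all lines.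
import Mathlib
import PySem

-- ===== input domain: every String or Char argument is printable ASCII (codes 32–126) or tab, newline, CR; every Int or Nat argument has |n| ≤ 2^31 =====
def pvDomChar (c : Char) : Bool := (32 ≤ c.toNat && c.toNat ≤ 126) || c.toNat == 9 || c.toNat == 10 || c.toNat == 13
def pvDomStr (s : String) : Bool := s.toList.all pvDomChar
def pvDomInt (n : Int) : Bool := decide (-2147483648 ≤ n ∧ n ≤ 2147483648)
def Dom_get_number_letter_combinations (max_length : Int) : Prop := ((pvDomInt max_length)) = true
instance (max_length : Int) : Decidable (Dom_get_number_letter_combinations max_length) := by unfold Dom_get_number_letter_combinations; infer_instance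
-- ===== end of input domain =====

-- B builds the suffix table by dynamic programming (each level extended by one trailing letter) and emits all lines in one flat pass with the empty suffix standing for the bare-number line (alternative decomposition; same output).


-- ===== PORT A =====
-- alphabet = 'abcdefghijklmnopqrstuvwxyz'
def pvAlphabet : List Char := "abcdefghijklmnopqrstuvwxyz".toList

-- itertools.product(alphabet, repeat=n), each tuple already ''.join-ed; lexicographic order,
-- leftmost position varies slowest (exactly itertools.product's order).
def pvProd : Nat → List String
  | 0 => [""]
  | n + 1 => pvAlphabet.flatMap (fun c => (pvProd n).map (fun s => String.ofList (c :: s.toList)))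

def get_number_letter_combinations (max_length : Int) : String :=
  let output : List String :=
    (PySem.List.pyRange max_length 0 (-1)).foldl (fun acc number =>
      let acc := acc ++ [PySem.Int.toStr number]
      (PySem.List.pyRange 1 (max_length + 1) 1).foldl (fun acc len =>
        acc ++ (pvProd len.toNat).map (fun comb => PySem.Int.toStr number ++ comb)) acc) []
  String.intercalate "\n" output ++ "\n"

-- ===== PORT B =====
def get_number_letter_combinations_alt (max_length : Int) : String :=
  -- suffixes = ['']; level = ['']; for _ in range(max_length): level = extend; suffixes += level
  let st : List String × List String :=
    (PySem.List.pyRange 0 max_length 1).foldl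
      (fun st _ =>
        let level := st.2.flatMap (fun s => pvAlphabet.map (fun c => s ++ String.ofList [c]))
        (st.1 ++ level, level))
      ([""], [""])
  let lines : List String :=
    (PySem.List.pyRange max_length 0 (-1)).flatMap
      (fun n => st.1.map (fun s => PySem.Int.toStr n ++ s))
  String.intercalate "\n" lines ++ "\n"

-- ===== PRECONDITION & SPEC =====
def Spec_get_number_letter_combinations (max_length : Int) (out : String) : Prop := out = get_number_letter_combinations_alt max_length
instance (max_length : Int) (out : String) : Decidable (Spec_get_number_letter_combinations max_length out) := by unfold Spec_get_number_letter_combinations; infer_instance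

-- ===== CLAIM (what is proved, stated in full; the proofs are below) =====
def Claim_equal_get_number_letter_combinations : Prop := ∀ (max_length : Int), Dom_get_number_letter_combinations max_length → Spec_get_number_letter_combinations max_length (get_number_letter_combinations max_length)

-- ===== LEMMAS AND PROOFS =====

-- B's one-trailing-letter extension of the length-n table is the length-(n+1) table.
theorem pv_extend_prod (n : Nat) :
    (pvProd n).flatMap (fun s => pvAlphabet.map (fun c => s ++ String.ofList [c]))
      = pvProd (n + 1) := by
  induction n with
  | zero => decide
  | succ n ih =>
    show (pvProd (n+1)).flatMap _ = pvProd (n+2)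
    conv_lhs => rw [show pvProd (n+1) = pvAlphabet.flatMap (fun c => (pvProd n).map (fun s => String.ofList (c :: s.toList))) from rfl]
    rw [List.flatMap_assoc]
    conv_rhs => rw [show pvProd (n+2) = pvAlphabet.flatMap (fun c => (pvProd (n+1)).map (fun s => String.ofList (c :: s.toList))) from rfl]
    refine List.flatMap_congr ?_
    intro c _
    rw [← ih, List.flatMap_map, List.map_flatMap]
    refine List.flatMap_congr ?_
    intro s _
    rw [List.map_map]
    refine List.map_congr_left ?_
    intro d _
    show String.ofList (c :: s.toList) ++ String.ofList [d]
        = String.ofList (c :: (s ++ String.ofList [d]).toList)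
    apply String.toList_injective
    simp [String.toList_append]

-- The DP fold's state after the steps of any driver list: accumulated table and current level
-- depend only on the list's length.
theorem pv_fold_state (l : List Int) :
    (l.foldl
      (fun (st : List String × List String) _ =>
        let level := st.2.flatMap (fun s => pvAlphabet.map (fun c => s ++ String.ofList [c]))
        (st.1 ++ level, level))
      ([""], [""]) : List String × List String)
    = ("" :: (List.range l.length).flatMap (fun k => pvProd (k + 1)), pvProd l.length) := by
  induction l using List.reverseRecOn with
  | nil => rfl
  | append_singleton l x ih =>
    rw [List.foldl_append, ih]
    simp [List.range_succ, pv_extend_prod]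

-- A's inner double loop over lengths equals a scan of the concatenated suffix table.
theorem pv_inner_eq (m number : Int) (acc : List String) :
    (PySem.List.pyRange 1 (m + 1) 1).foldl (fun acc len =>
        acc ++ (pvProd len.toNat).map (fun comb => PySem.Int.toStr number ++ comb)) acc
      = acc ++ ((PySem.List.pyRange 1 (m + 1) 1).flatMap (fun len => pvProd len.toNat)).map
          (fun s => PySem.Int.toStr number ++ s) := by
  rw [PySem.List.foldl_append_eq_flatMap, List.map_flatMap]

-- length-indexed suffix tables agree between the two phrasings of the range
theorem pv_suffix_tables (m : Int) :
    (PySem.List.pyRange 1 (m + 1) 1).flatMap (fun len => pvProd len.toNat)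
      = (List.range m.toNat).flatMap (fun k => pvProd (k + 1)) := by
  rw [PySem.List.pyRange_one]
  have : (m + 1 - 1).toNat = m.toNat := by omega
  rw [this, List.flatMap_map]
  refine List.flatMap_congr ?_
  intro k hk
  congr 1
  omega

-- A's outer loop (append the bare number, then the prefixed suffixes) as one flatMap.
theorem pv_outer (sf : List String) (l : List Int) (acc : List String) :
    l.foldl (fun acc n => acc ++ [PySem.Int.toStr n]
        ++ sf.map (fun s => PySem.Int.toStr n ++ s)) acc
      = acc ++ l.flatMap (fun n =>
          PySem.Int.toStr n :: sf.map (fun s => PySem.Int.toStr n ++ s)) := by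
  induction l generalizing acc with
  | nil => simp
  | cons x l ih => simp [List.flatMap_def]

-- ===== VERDICT (by name: the statement is the Claim_ definition above) =====
theorem get_number_letter_combinations_spec : Claim_equal_get_number_letter_combinations := by
  intro m _
  unfold Spec_get_number_letter_combinations
  unfold get_number_letter_combinations get_number_letter_combinations_alt
  rw [pv_fold_state, PySem.List.length_pyRange_one]
  have hm : (m - 0).toNat = m.toNat := by omega
  rw [hm]
  simp only [pv_inner_eq, pv_suffix_tables]
  rw [pv_outer]
  simp
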